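-- pv_equiv track=rewrite | github.com/sanjanb/cti-nlp-system | backend/threat_ner.py | extract_threat_entities
-- ===== SOURCE A (Python) =====
-- def extract_threat_entities(text):
--     # MOCK function - simulate NER output
--     entities = []
--     words = text.split()
--     for word in words:
--         if "http" in word:
--             entities.append({"type": "URL", "value": word})
--         elif "Microsoft" in word or "Linux" in word:
--             entities.append({"type": "OS", "value": word})
--         elif "Qbot" in word or "Emotet" in word:
--             entities.append({"type": "Malware", "value": word})
--     return entities
-- ===== SOURCE B (Python) =====
-- def _classify(word):
--     if "http" in word:
--         return "URL"
--     if "Microsoft" in word or "Linux" in word: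
--         return "OS"
--     if "Qbot" in word or "Emotet" in word:
--         return "Malware"
--     return None
--
-- def extract_threat_entities(text):
--     # Single character-level scan: tokenize and classify in one pass, no split().
--     entities = []
--     word = ""
--     for ch in text + " ":  # trailing sentinel space flushes the final word
--         if ch.isspace():
--             if word:
--                 t = _classify(word)
--                 if t is not None:
--                     entities.append({"type": t, "value": word})
--                 word = ""
--         else:
--             word += ch
--     return entities
-- ===== Notes on version B (the rewrite author's own statement) =====
-- stated objective: alternative
-- what changed: B replaces split()-then-loop-over-words by a single character-level scanner that tokenizes and classifies in one pass over the text (with an Optional-returning classify helper), never materializing the word list.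
import Mathlib
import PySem

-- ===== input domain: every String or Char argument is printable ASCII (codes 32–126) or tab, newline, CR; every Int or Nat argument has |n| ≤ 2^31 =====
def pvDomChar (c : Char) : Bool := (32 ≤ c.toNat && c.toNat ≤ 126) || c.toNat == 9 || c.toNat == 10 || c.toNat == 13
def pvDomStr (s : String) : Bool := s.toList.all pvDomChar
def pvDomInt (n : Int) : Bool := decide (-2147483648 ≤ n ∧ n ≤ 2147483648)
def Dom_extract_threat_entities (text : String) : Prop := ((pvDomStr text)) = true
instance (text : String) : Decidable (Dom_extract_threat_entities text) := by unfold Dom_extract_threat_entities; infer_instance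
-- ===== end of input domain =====

-- B: a single character-level scan that tokenizes and classifies in one pass (alternative decomposition; same cost).

-- ===== PORT A =====
-- A: split the text into words, then an if/elif cascade per word.
def extract_threat_entities (text : String) : List (List (String × String)) :=
  (PySem.Str.split₀ text).foldl (fun entities word =>
    if PySem.Str.isIn "http" word then
      entities ++ [[("type", "URL"), ("value", word)]]
    else if PySem.Str.isIn "Microsoft" word || PySem.Str.isIn "Linux" word then
      entities ++ [[("type", "OS"), ("value", word)]]
    else if PySem.Str.isIn "Qbot" word || PySem.Str.isIn "Emotet" word then
      entities ++ [[("type", "Malware"), ("value", word)]]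
    else entities) []

-- ===== PORT B =====
-- B: one character-level scan of the text (no split()): accumulate the current
-- word, and at each whitespace flush it through an Optional-returning classifier.
def pvClassify (word : String) : Option String :=
  if PySem.Str.isIn "http" word then some "URL"
  else if PySem.Str.isIn "Microsoft" word || PySem.Str.isIn "Linux" word then some "OS"
  else if PySem.Str.isIn "Qbot" word || PySem.Str.isIn "Emotet" word then some "Malware"
  else none

-- the for-loop body of Source B; the current word is held as its list of characters
def pvScanStep (st : List (List (String × String)) × List Char) (ch : Char) :
    List (List (String × String)) × List Char :=
  if PySem.Chars.isspace ch then
    if st.2.isEmpty then st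
    else
      match pvClassify (String.ofList st.2) with
      | some t => (st.1 ++ [[("type", t), ("value", String.ofList st.2)]], [])
      | none => (st.1, [])
  else (st.1, st.2 ++ [ch])

def extract_threat_entities_alt (text : String) : List (List (String × String)) :=
  -- 'for ch in text + " "' iterates the code points of text ++ " "
  (((text ++ " ").toList).foldl pvScanStep ([], [])).1

-- ===== PRECONDITION & SPEC =====
def Spec_extract_threat_entities (text : String) (out : List (List (String × String))) : Prop := out = extract_threat_entities_alt text
instance (text : String) (out : List (List (String × String))) : Decidable (Spec_extract_threat_entities text out) := by unfold Spec_extract_threat_entities; infer_instance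

-- ===== CLAIM (what is proved, stated in full; the proofs are below) =====
def Claim_equal_extract_threat_entities : Prop := ∀ (text : String), Dom_extract_threat_entities text → Spec_extract_threat_entities text (extract_threat_entities text)

-- ===== LEMMAS AND PROOFS =====
-- A's per-word cascade, on a word given as a character list
def pvStepA (entities : List (List (String × String))) (w : List Char) :
    List (List (String × String)) :=
  if PySem.Str.isIn "http" (String.ofList w) then
    entities ++ [[("type", "URL"), ("value", String.ofList w)]]
  else if PySem.Str.isIn "Microsoft" (String.ofList w) || PySem.Str.isIn "Linux" (String.ofList w) then
    entities ++ [[("type", "OS"), ("value", String.ofList w)]]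
  else if PySem.Str.isIn "Qbot" (String.ofList w) || PySem.Str.isIn "Emotet" (String.ofList w) then
    entities ++ [[("type", "Malware"), ("value", String.ofList w)]]
  else entities

theorem pv_flush (E : List (List (String × String))) (w : List Char) :
    (match pvClassify (String.ofList w) with
      | some t => (E ++ [[("type", t), ("value", String.ofList w)]], ([] : List Char))
      | none => (E, ([] : List Char))) = (pvStepA E w, []) := by
  unfold pvClassify pvStepA
  split_ifs <;> rfl

theorem pv_step_space (c : Char) (hs : PySem.Chars.isspace c = true)
    (E : List (List (String × String))) (cur : List Char) (h : cur ≠ []) :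
    pvScanStep (E, cur) c = (pvStepA E cur, []) := by
  simp only [pvScanStep, hs, if_true]
  rw [if_neg (by simp [h])]
  exact pv_flush E cur

theorem pv_step_space_nil (c : Char) (hs : PySem.Chars.isspace c = true)
    (E : List (List (String × String))) :
    pvScanStep (E, []) c = (E, []) := by
  simp [pvScanStep, hs]

theorem pv_step_char (c : Char) (hs : PySem.Chars.isspace c = false)
    (E : List (List (String × String))) (cur : List Char) :
    pvScanStep (E, cur) c = (E, cur ++ [c]) := by
  simp [pvScanStep, hs]

theorem pv_go_acc (cs : List Char) (cur : List Char) (acc : List (List Char)) :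
    PySem.Chars.split₀.go cs cur acc = acc.reverse ++ PySem.Chars.split₀.go cs cur [] := by
  induction cs generalizing cur acc with
  | nil =>
    simp only [PySem.Chars.split₀.go]
    split_ifs <;> simp
  | cons c rest ih =>
    simp only [PySem.Chars.split₀.go]
    split_ifs with h1 h2
    · rw [ih [] acc, ih [] []]
    · rw [ih [] (cur.reverse :: acc), ih [] [cur.reverse]]
      simp
    · exact ih (c :: cur) acc

theorem pv_scan_eq (cs : List Char) (cur : List Char) (E : List (List (String × String))) :
    ((cs ++ [' ']).foldl pvScanStep (E, cur)).1
      = (PySem.Chars.split₀.go cs cur.reverse []).foldl pvStepA E := by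
  induction cs generalizing cur E with
  | nil =>
    simp only [List.nil_append, List.foldl_cons, List.foldl_nil, PySem.Chars.split₀.go]
    by_cases h : cur = []
    · subst h
      rw [pv_step_space_nil ' ' (by decide) E]
      simp
    · rw [pv_step_space ' ' (by decide) E cur h]
      have hr : cur.reverse.isEmpty = false := by simp [h]
      simp [hr]
  | cons c rest ih =>
    rw [List.cons_append, List.foldl_cons]
    by_cases hs : PySem.Chars.isspace c = true
    · by_cases h : cur = []
      · subst h
        rw [pv_step_space_nil c hs E]
        rw [show PySem.Chars.split₀.go (c :: rest) ([] : List Char).reverse []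
              = PySem.Chars.split₀.go rest [] [] from by
          simp [PySem.Chars.split₀.go, hs]]
        simpa using ih [] E
      · rw [pv_step_space c hs E cur h]
        rw [show PySem.Chars.split₀.go (c :: rest) cur.reverse []
              = [cur] ++ PySem.Chars.split₀.go rest [] [] from by
          have hr : cur.reverse.isEmpty = false := by simp [h]
          simp only [PySem.Chars.split₀.go, hs, if_true, hr, Bool.false_eq_true, if_false]
          rw [pv_go_acc rest [] [cur.reverse.reverse]]
          simp]
        rw [List.foldl_append]
        simpa using ih [] (pvStepA E cur)
    · have hs' : PySem.Chars.isspace c = false := by simpa using hs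
      rw [pv_step_char c hs' E cur]
      rw [show PySem.Chars.split₀.go (c :: rest) cur.reverse []
            = PySem.Chars.split₀.go rest (c :: cur.reverse) [] from by
        simp [PySem.Chars.split₀.go, hs']]
      rw [show c :: cur.reverse = (cur ++ [c]).reverse from by simp]
      exact ih (cur ++ [c]) E

-- ===== VERDICT (by name: the statement is the Claim_ definition above) =====
theorem extract_threat_entities_spec : Claim_equal_extract_threat_entities := by
  intro text _
  unfold Spec_extract_threat_entities extract_threat_entities extract_threat_entities_alt
  have hsplit : PySem.Str.split₀ text = (PySem.Chars.split₀ text.toList).map String.ofList := by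
    simp [PySem.Str.split₀]
  have hl : (text ++ " ").toList = text.toList ++ [' '] := by simp
  rw [hsplit, hl, pv_scan_eq text.toList [] []]
  simp only [PySem.Chars.split₀, List.reverse_nil]
  rw [List.foldl_map]
  rfl
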